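-- pv_equiv track=rewrite | github.com/micsthepick/biblesearchtest | discordbot.py | get_egw_paragraphs
-- ===== SOURCE A (Python) =====
-- def get_egw_paragraphs(paras_object, from_pid, to_pid=None):
--     """ Generator to yield verse number and text from a chapter. """
--     started = False
--     for para in paras_object:
--         para_id = para.get("para_id", "???")
--         if para_id == from_pid:
--             started = True
--         elif not started:
--             continue
--         if para_id == to_pid:
--             break
--         text = para.get("content")
--         refcode_2 = para.get('refcode_2', '')
--         refcode_3 = para.get('refcode_3', '')
--         refcode_4 = para.get('refcode_4', False)
--         if refcode_4:
--             continue
--         yield (refcode_2, refcode_3), text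
-- ===== SOURCE B (Python) =====
-- def get_egw_paragraphs(paras_object, from_pid, to_pid=None):
--     """Locate-then-stream: find the first from_pid paragraph by index, then
--     stream the tail slice, stopping at to_pid and skipping refcode_4 paras."""
--     paras = list(paras_object)
--     try:
--         start = [p.get("para_id", "???") for p in paras].index(from_pid)
--     except ValueError:
--         return
--     for para in paras[start:]:
--         if para.get("para_id", "???") == to_pid:
--             return
--         if para.get("refcode_4", False):
--             continue
--         yield (para.get("refcode_2", ""), para.get("refcode_3", "")), para.get("content")
-- ===== Notes on version B (the rewrite author's own statement) =====
-- stated objective: alternative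
-- what changed: Replaces A's single flag-controlled state-machine loop with a two-phase locate-then-stream decomposition: first find the index of the first from_pid paragraph (map para_ids, .index), then stream the tail slice with break/skip logic and no 'started' flag.
import Mathlib
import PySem

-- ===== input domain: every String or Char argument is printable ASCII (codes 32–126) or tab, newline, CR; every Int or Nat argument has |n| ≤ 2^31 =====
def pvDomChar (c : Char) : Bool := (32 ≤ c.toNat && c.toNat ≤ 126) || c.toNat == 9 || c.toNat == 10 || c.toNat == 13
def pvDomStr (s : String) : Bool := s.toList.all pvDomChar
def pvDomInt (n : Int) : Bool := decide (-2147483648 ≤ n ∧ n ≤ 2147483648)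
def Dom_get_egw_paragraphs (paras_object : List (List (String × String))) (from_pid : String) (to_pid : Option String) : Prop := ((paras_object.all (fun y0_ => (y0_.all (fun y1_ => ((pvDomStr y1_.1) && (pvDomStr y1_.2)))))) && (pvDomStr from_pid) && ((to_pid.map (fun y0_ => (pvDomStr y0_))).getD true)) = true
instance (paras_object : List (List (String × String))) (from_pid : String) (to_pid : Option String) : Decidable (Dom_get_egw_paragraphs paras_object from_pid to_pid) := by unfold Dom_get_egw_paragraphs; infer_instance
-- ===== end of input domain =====

-- B replaces A's 'started' flag state machine by locate-then-stream (index of first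
-- from_pid, then a single streaming pass over the tail slice); alternative decomposition,
-- same cost. Equivalence of the fully-consumed generators' outputs is proved below.
-- (dict values are strings on Dom, so `.get('refcode_4', False)` is truthy iff the key maps
-- to a nonempty string — ported as getD "refcode_4" "" ≠ "" in both ports.)

-- para.get(k, dflt) for a paragraph dict (assoc list, first match)
def pvParaGet (para : List (String × String)) (k dflt : String) : String :=
  (PySem.Dict.mk para).getD k dflt

-- ===== PORT A =====
-- A's loop: 'started' flag, break on to_pid, skip refcode_4, yield ((r2,r3),content)
def pvGoA (from_pid : String) (to_pid : Option String) :
    Bool → List (List (String × String)) → List ((String × String) × Option String)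
  | _, [] => []
  | started, para :: rest =>
    let para_id := pvParaGet para "para_id" "???"
    let started' := (para_id == from_pid) || started  -- if == from_pid: started = True
    if started' then                                   -- elif not started: continue
      if to_pid = some para_id then []                 -- if para_id == to_pid: break
      else
        let text := (PySem.Dict.mk para).get? "content"
        let r2 := pvParaGet para "refcode_2" ""
        let r3 := pvParaGet para "refcode_3" ""
        if pvParaGet para "refcode_4" "" ≠ "" then     -- if refcode_4: continue
          pvGoA from_pid to_pid started' rest
        else ((r2, r3), text) :: pvGoA from_pid to_pid started' rest
    else pvGoA from_pid to_pid started rest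

def get_egw_paragraphs (paras_object : List (List (String × String))) (from_pid : String) (to_pid : Option String) : List ((String × String) × Option String) :=
  pvGoA from_pid to_pid false paras_object

-- ===== PORT B =====
-- B phase 2: stream paras, stopping at to_pid, skipping refcode_4
def pvEmitB (to_pid : Option String) :
    List (List (String × String)) → List ((String × String) × Option String)
  | [] => []
  | para :: rest =>
    if to_pid = some (pvParaGet para "para_id" "???") then []
    else if pvParaGet para "refcode_4" "" ≠ "" then pvEmitB to_pid rest
    else ((pvParaGet para "refcode_2" "", pvParaGet para "refcode_3" ""),
          (PySem.Dict.mk para).get? "content") :: pvEmitB to_pid rest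

def get_egw_paragraphs_alt (paras_object : List (List (String × String))) (from_pid : String) (to_pid : Option String) : List ((String × String) × Option String) :=
  -- B phase 1: [p.get("para_id","???") for p in paras].index(from_pid); ValueError → []
  match PySem.List.index? (paras_object.map (fun p => pvParaGet p "para_id" "???")) from_pid with
  | none => []
  | some i => pvEmitB to_pid (PySem.List.slice paras_object (some (i : Int)) none)

-- ===== PRECONDITION & SPEC =====
def Spec_get_egw_paragraphs (paras_object : List (List (String × String))) (from_pid : String) (to_pid : Option String) (out : List ((String × String) × Option String)) : Prop := out = get_egw_paragraphs_alt paras_object from_pid to_pid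
instance (paras_object : List (List (String × String))) (from_pid : String) (to_pid : Option String) (out : List ((String × String) × Option String)) : Decidable (Spec_get_egw_paragraphs paras_object from_pid to_pid out) := by unfold Spec_get_egw_paragraphs; infer_instance

-- ===== CLAIM (what is proved, stated in full; the proofs are below) =====
def Claim_equal_get_egw_paragraphs : Prop := ∀ (paras_object : List (List (String × String))) (from_pid : String) (to_pid : Option String), Dom_get_egw_paragraphs paras_object from_pid to_pid → Spec_get_egw_paragraphs paras_object from_pid to_pid (get_egw_paragraphs paras_object from_pid to_pid)

-- ===== LEMMAS AND PROOFS =====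

-- once started, A's loop is exactly B's streaming pass
theorem pvGoA_true (from_pid : String) (to_pid : Option String) :
    ∀ l, pvGoA from_pid to_pid true l = pvEmitB to_pid l := by
  intro l
  induction l with
  | nil => simp [pvGoA, pvEmitB]
  | cons para rest ih =>
    simp only [pvGoA, pvEmitB, Bool.or_true, if_true]
    split
    · rfl
    · split <;> simp [ih]

theorem pvGoA_false (from_pid : String) (to_pid : Option String) :
    ∀ l, pvGoA from_pid to_pid false l =
      match PySem.List.index? (l.map (fun p => pvParaGet p "para_id" "???")) from_pid with
      | none => []
      | some i => pvEmitB to_pid (l.drop i) := by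
  intro l
  induction l with
  | nil => simp [pvGoA, PySem.List.index?]
  | cons para rest ih =>
    by_cases h : pvParaGet para "para_id" "???" = from_pid
    · rw [show (para :: rest).map (fun p => pvParaGet p "para_id" "???")
            = from_pid :: rest.map (fun p => pvParaGet p "para_id" "???") by simp [h]]
      rw [PySem.List.index?_cons_self]
      simp only [pvGoA, pvEmitB, h, BEq.rfl, Bool.true_or, if_true, List.drop_zero]
      split
      · rfl
      · split <;> simp [pvGoA_true]
    · have hne : (pvParaGet para "para_id" "???" == from_pid) = false := by
        simpa using h
      rw [show (para :: rest).map (fun p => pvParaGet p "para_id" "???")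
            = pvParaGet para "para_id" "???" :: rest.map (fun p => pvParaGet p "para_id" "???") by simp]
      rw [PySem.List.index?_cons_of_ne _ h]
      simp only [pvGoA, hne, Bool.false_or]
      rw [ih]
      cases PySem.List.index? (rest.map (fun p => pvParaGet p "para_id" "???")) from_pid with
      | none => rfl
      | some i => simp

-- ===== VERDICT (by name: the statement is the Claim_ definition above) =====
theorem get_egw_paragraphs_spec : Claim_equal_get_egw_paragraphs := by
  intro paras from_pid to_pid _
  unfold Spec_get_egw_paragraphs get_egw_paragraphs get_egw_paragraphs_alt
  rw [pvGoA_false]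
  cases h : PySem.List.index? (paras.map (fun p => pvParaGet p "para_id" "???")) from_pid with
  | none => rfl
  | some i => simp [PySem.List.slice_from_natCast]
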